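-- pv_equiv track=rewrite | github.com/dbspgnl/CodingTest_Python | 기초/외계어 사전.py | solution
-- ===== SOURCE A (Python) =====
-- def solution(spell, dic):
--     result = []
--     val = 0
--     for d in dic:
--         for w in spell:
--             val += list(set(d)).count(w)
--         result.append(val)
--         val = 0
--     return 1 if len(spell) in result else 2
-- ===== SOURCE B (Python) =====
-- def solution(spell, dic):
--     need = set(spell)
--     return 1 if any(need <= set(d) for d in dic) else 2
-- ===== Notes on version B (the rewrite author's own statement) =====
-- stated objective: faster
-- what changed: Replaced the per-word count-accumulation (rebuilding list(set(d)) for every spell char) into a result list followed by a membership test of len(spell) with a single short-circuiting any() over dic doing one set-subset test per word, with no accumulator or result list.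
import Mathlib
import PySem

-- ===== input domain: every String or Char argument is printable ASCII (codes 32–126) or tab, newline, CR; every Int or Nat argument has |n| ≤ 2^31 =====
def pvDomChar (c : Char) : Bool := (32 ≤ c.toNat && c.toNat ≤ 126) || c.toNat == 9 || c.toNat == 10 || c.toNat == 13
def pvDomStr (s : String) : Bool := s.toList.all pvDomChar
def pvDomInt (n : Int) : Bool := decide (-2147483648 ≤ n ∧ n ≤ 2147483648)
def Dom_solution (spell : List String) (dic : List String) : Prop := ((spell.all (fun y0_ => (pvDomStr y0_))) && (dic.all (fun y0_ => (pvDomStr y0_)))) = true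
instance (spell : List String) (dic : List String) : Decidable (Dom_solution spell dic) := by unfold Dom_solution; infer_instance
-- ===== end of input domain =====

-- B replaces A's per-word count accumulation into a result list (checked afterwards for len(spell))
-- with one short-circuiting subset test per dictionary word, building each word's set once
-- instead of once per spell character (a timing run measured B faster).

-- ===== PORT A =====
-- list(set(d)) is a list of the distinct characters of d as one-char strings; .count(w) counts
-- occurrences of the string w in it (order-independent, so the Set model is exact).
def solution (spell : List String) (dic : List String) : Int :=
  let result : List Int := dic.foldl (fun acc d =>
    let val : Int := spell.foldl (fun v w =>
      v + (((PySem.Set.ofList d.toList).map (fun c => String.ofList [c])).count w : Int)) 0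
    acc ++ [val]) []
  if (spell.length : Int) ∈ result then 1 else 2

-- ===== PORT B =====
def solution_alt (spell : List String) (dic : List String) : Int :=
  let need := PySem.Set.ofList spell
  if dic.any (fun d =>
      PySem.Set.issubset need (PySem.Set.ofList (d.toList.map (fun c => String.ofList [c])))) then 1
  else 2

-- ===== PRECONDITION & SPEC =====
def Spec_solution (spell : List String) (dic : List String) (out : Int) : Prop := out = solution_alt spell dic
instance (spell : List String) (dic : List String) (out : Int) : Decidable (Spec_solution spell dic out) := by unfold Spec_solution; infer_instance

-- ===== CLAIM (what is proved, stated in full; the proofs are below) =====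
def Claim_equal_solution : Prop := ∀ (spell : List String) (dic : List String), Dom_solution spell dic → Spec_solution spell dic (solution spell dic)

-- ===== LEMMAS AND PROOFS =====

-- the distinct one-char strings of d, as A sees them
def pvChars (d : String) : List String :=
  (PySem.Set.ofList d.toList).map (fun c => String.ofList [c])

lemma pvChars_nodup (d : String) : (pvChars d).Nodup := by
  refine List.Nodup.map ?_ (PySem.Set.nodup_ofList _)
  intro a b h
  have h2 := congrArg String.toList h
  simp only [String.toList_ofList] at h2
  simpa using h2

lemma pvChars_mem (d : String) (w : String) :
    w ∈ pvChars d ↔ w ∈ d.toList.map (fun c => String.ofList [c]) := by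
  simp [pvChars, PySem.Set.mem_ofList]

lemma pvCount_eq (d : String) (w : String) :
    ((pvChars d).count w : Int) = if w ∈ pvChars d then 1 else 0 := by
  split_ifs with h
  · exact_mod_cast List.count_eq_one_of_mem (pvChars_nodup d) h
  · exact_mod_cast List.count_eq_zero_of_not_mem h

lemma pvFoldl_shift (c : String → Int) (l : List String) (v : Int) :
    l.foldl (fun v w => v + c w) v = v + l.foldl (fun v w => v + c w) 0 := by
  induction l generalizing v with
  | nil => simp
  | cons x xs ih => simp only [List.foldl_cons]; rw [ih (v + c x), ih (0 + c x)]; ring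

-- the inner loop's value equals len(spell) exactly when every spell element is a distinct char of d
lemma pvVal_eq_len_iff (spell : List String) (d : String) :
    (spell.foldl (fun v w => v + ((pvChars d).count w : Int)) 0 = (spell.length : Int))
      ↔ ∀ w ∈ spell, w ∈ pvChars d := by
  induction spell with
  | nil => simp
  | cons x xs ih =>
    simp only [List.foldl_cons, List.length_cons, List.mem_cons, forall_eq_or_imp]
    rw [pvFoldl_shift, zero_add, pvCount_eq]
    have hle : xs.foldl (fun v w => v + ((pvChars d).count w : Int)) 0 ≤ (xs.length : Int) := by
      clear ih
      induction xs with
      | nil => simp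
      | cons y ys ihy =>
        simp only [List.foldl_cons, List.length_cons]
        rw [pvFoldl_shift, zero_add, pvCount_eq]
        split_ifs <;> push_cast <;> omega
    constructor
    · intro h
      split_ifs at h with hx
      · exact ⟨hx, ih.mp (by push_cast at h ⊢; omega)⟩
      · exfalso; push_cast at h; omega
    · rintro ⟨hx, hxs⟩
      rw [if_pos hx]
      have := ih.mpr hxs
      push_cast; omega

lemma pvResult_eq (spell : List String) (dic : List String) (acc : List Int) :
    dic.foldl (fun acc d =>
      acc ++ [spell.foldl (fun v w => v + ((pvChars d).count w : Int)) 0]) acc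
      = acc ++ dic.map (fun d => spell.foldl (fun v w => v + ((pvChars d).count w : Int)) 0) := by
  induction dic generalizing acc with
  | nil => simp
  | cons d ds ih => simp [ih]

-- ===== VERDICT (by name: the statement is the Claim_ definition above) =====
theorem solution_spec : Claim_equal_solution := by
  intro spell dic _
  show solution spell dic = solution_alt spell dic
  unfold solution solution_alt
  simp only []
  rw [show (fun acc d =>
        acc ++ [spell.foldl (fun v w =>
          v + (((PySem.Set.ofList d.toList).map (fun c => String.ofList [c])).count w : Int)) 0]) =
      (fun (acc : List Int) d =>
        acc ++ [spell.foldl (fun v w => v + ((pvChars d).count w : Int)) 0]) from rfl]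
  rw [pvResult_eq, List.nil_append]
  have hcond : ((spell.length : Int) ∈
      dic.map (fun d => spell.foldl (fun v w => v + ((pvChars d).count w : Int)) 0))
      ↔ (dic.any (fun d =>
        PySem.Set.issubset (PySem.Set.ofList spell)
          (PySem.Set.ofList (d.toList.map (fun c => String.ofList [c])))) = true) := by
    rw [List.mem_map, List.any_eq_true]
    constructor
    · rintro ⟨d, hd, hval⟩
      refine ⟨d, hd, ?_⟩
      rw [PySem.Set.issubset_iff]
      intro w hw
      rw [PySem.Set.mem_ofList] at hw ⊢
      exact (pvChars_mem d w).mp ((pvVal_eq_len_iff spell d).mp hval w hw)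
    · rintro ⟨d, hd, hsub⟩
      refine ⟨d, hd, (pvVal_eq_len_iff spell d).mpr ?_⟩
      intro w hw
      rw [PySem.Set.issubset_iff] at hsub
      have := hsub w (by rw [PySem.Set.mem_ofList]; exact hw)
      rw [PySem.Set.mem_ofList] at this
      exact (pvChars_mem d w).mpr this
  split_ifs with h1 h2 h2 <;> first | rfl | (exfalso; exact h2 (hcond.mp h1)) | (exfalso; exact h1 (hcond.mpr h2))
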